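-- pv_equiv track=rewrite | github.com/JiahaoZhang2001/Early-diffusion-signals | k_window_only_experiment.py | bfs_first_k_nodes
-- ===== SOURCE A (Python) =====
-- from collections import defaultdict, deque
--
-- def bfs_first_k_nodes(edges, root, k):
--     children = defaultdict(list)
--     for p, c, _ in edges:
--         children[p].append(c)
--     for p in children:
--         children[p] = sorted(children[p])
--
--     q = deque([root])
--     visited = []
--     seen = {root}
--
--     while q and len(visited) < k:
--         u = q.popleft()
--         visited.append(u)
--         for v in children.get(u, []):
--             if v not in seen:
--                 seen.add(v)
--                 q.append(v)
--
--     return visited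
-- ===== SOURCE B (Python) =====
-- def bfs_first_k_nodes(edges, root, k):
--     # Level-synchronous (frontier) BFS: explicit per-level lists instead of a
--     # single FIFO deque; children are sorted lazily at visit time instead of
--     # pre-sorting the whole adjacency dict.
--     children = {}
--     for p, c, _ in edges:
--         children.setdefault(p, []).append(c)
--
--     visited = []
--     seen = {root}
--     frontier = [root]
--     while frontier and len(visited) < k:
--         next_frontier = []
--         for u in frontier:
--             if len(visited) >= k:
--                 break
--             visited.append(u)
--             for v in sorted(children.get(u, [])):
--                 if v not in seen:
--                     seen.add(v)
--                     next_frontier.append(v)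
--         frontier = next_frontier
--     return visited
-- ===== Notes on version B (the rewrite author's own statement) =====
-- stated objective: alternative
-- what changed: Replaces the single FIFO-deque BFS over a pre-sorted adjacency dict by a level-synchronous BFS with explicit frontier/next-frontier lists and lazy per-node sorting of children at visit time.
import Mathlib
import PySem

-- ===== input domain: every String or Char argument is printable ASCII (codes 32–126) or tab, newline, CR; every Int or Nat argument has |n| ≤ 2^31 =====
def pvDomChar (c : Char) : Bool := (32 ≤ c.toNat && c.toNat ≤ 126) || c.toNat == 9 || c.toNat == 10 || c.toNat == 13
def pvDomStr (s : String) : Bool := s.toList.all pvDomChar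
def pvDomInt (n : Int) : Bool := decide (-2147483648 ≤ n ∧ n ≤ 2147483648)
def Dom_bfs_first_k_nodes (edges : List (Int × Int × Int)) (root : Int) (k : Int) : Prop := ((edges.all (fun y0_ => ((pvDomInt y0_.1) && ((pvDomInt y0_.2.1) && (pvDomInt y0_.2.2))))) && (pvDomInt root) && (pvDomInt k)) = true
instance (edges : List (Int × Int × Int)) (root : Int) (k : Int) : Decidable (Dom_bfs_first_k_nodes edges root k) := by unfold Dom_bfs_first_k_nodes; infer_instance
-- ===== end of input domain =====

-- B replaces A's single FIFO-deque BFS over a pre-sorted adjacency dict by a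
-- level-synchronous BFS (explicit frontier / next-frontier lists) that sorts a
-- node's children lazily at visit time; same return value (objective: alternative).

-- ===== PORT A =====
-- A's while-loop: q is the deque, visited the output, seen the visited-set.
-- Terminates because each iteration appends one node to visited and requires
-- visited.length < k.
def bfsLoopA (children : PySem.Dict Int (List Int)) (k : Int)
    (q visited : List Int) (seen : PySem.Set Int) : List Int :=
  match q with
  | [] => visited
  | u :: qrest =>
    if visited.length < k then
      let st := (children.getD u []).foldl
        (fun (acc : List Int × PySem.Set Int) v =>
          if PySem.Set.contains acc.2 v then acc else (acc.1 ++ [v], PySem.Set.add acc.2 v))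
        (qrest, seen)
      bfsLoopA children k st.1 (visited ++ [u]) st.2
    else visited
termination_by (k - visited.length).toNat
decreasing_by simp only [List.length_append, List.length_cons, List.length_nil]; omega

def bfs_first_k_nodes (edges : List (Int × Int × Int)) (root : Int) (k : Int) : List Int :=
  -- children = defaultdict(list); children[p].append(c) for each edge
  let base := edges.foldl (fun d e => d.modify e.1 [] (· ++ [e.2.1])) PySem.Dict.empty
  -- for p in children: children[p] = sorted(children[p])
  let children := base.keys.foldl
    (fun d p => d.insert p (PySem.List.sorted (d.getD p []) (fun x => x) false)) base
  bfsLoopA children k [root] [] (PySem.Set.ofList [root])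

-- ===== PORT B =====
-- B's inner for-loop over the current frontier (with the len(visited) >= k break),
-- returning the updated (visited, seen, next_frontier).
def bfsInnerB (children : PySem.Dict Int (List Int)) (k : Int) :
    List Int → List Int → PySem.Set Int → List Int → List Int × PySem.Set Int × List Int
  | [], visited, seen, next => (visited, seen, next)
  | u :: rest, visited, seen, next =>
    if k ≤ visited.length then (visited, seen, next)
    else
      let st := (PySem.List.sorted (children.getD u []) (fun x => x) false).foldl
        (fun (acc : PySem.Set Int × List Int) v =>
          if PySem.Set.contains acc.1 v then acc else (PySem.Set.add acc.1 v, acc.2 ++ [v]))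
        (seen, next)
      bfsInnerB children k rest (visited ++ [u]) st.1 st.2

-- port-termination lemma for B's outer loop (cited by decreasing_by below):
-- the inner loop never shrinks visited, and visits at least the frontier head.
theorem bfsInnerB_grow (children : PySem.Dict Int (List Int)) (k : Int) :
    ∀ (f visited : List Int) (seen : PySem.Set Int) (next : List Int),
      visited.length ≤ (bfsInnerB children k f visited seen next).1.length := by
  intro f
  induction f with
  | nil => intro visited seen next; simp [bfsInnerB]
  | cons u rest ih =>
    intro visited seen next
    simp only [bfsInnerB]
    split
    · simp
    · exact le_trans (by simp) (ih (visited ++ [u]) _ _)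

theorem bfsInnerB_grow_one (children : PySem.Dict Int (List Int)) (k : Int)
    (u : Int) (rest visited : List Int) (seen : PySem.Set Int) (next : List Int)
    (h : (visited.length : Int) < k) :
    visited.length + 1 ≤ (bfsInnerB children k (u :: rest) visited seen next).1.length := by
  simp only [bfsInnerB]
  split
  · omega
  · have := bfsInnerB_grow children k rest (visited ++ [u])
    simpa using this _ _

-- B's outer while-loop over frontiers.
def bfsOuterB (children : PySem.Dict Int (List Int)) (k : Int)
    (frontier visited : List Int) (seen : PySem.Set Int) : List Int :=
  match frontier with
  | [] => visited
  | u :: rest =>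
    if visited.length < k then
      let st := bfsInnerB children k (u :: rest) visited seen []
      bfsOuterB children k st.2.2 st.1 st.2.1
    else visited
termination_by (k - visited.length).toNat
decreasing_by
  have h1 := bfsInnerB_grow_one children k u rest visited seen [] (by omega)
  omega

def bfs_first_k_nodes_alt (edges : List (Int × Int × Int)) (root : Int) (k : Int) : List Int :=
  -- children = {}; children.setdefault(p, []).append(c) for each edge
  let children := edges.foldl (fun d e => d.insert e.1 (d.getD e.1 [] ++ [e.2.1])) PySem.Dict.empty
  bfsOuterB children k [root] [] (PySem.Set.ofList [root])

-- ===== PRECONDITION & SPEC =====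
def Spec_bfs_first_k_nodes (edges : List (Int × Int × Int)) (root : Int) (k : Int) (out : List Int) : Prop := out = bfs_first_k_nodes_alt edges root k
instance (edges : List (Int × Int × Int)) (root : Int) (k : Int) (out : List Int) : Decidable (Spec_bfs_first_k_nodes edges root k out) := by unfold Spec_bfs_first_k_nodes; infer_instance

-- ===== CLAIM (what is proved, stated in full; the proofs are below) =====
def Claim_equal_bfs_first_k_nodes : Prop := ∀ (edges : List (Int × Int × Int)) (root : Int) (k : Int), Dom_bfs_first_k_nodes edges root k → Spec_bfs_first_k_nodes edges root k (bfs_first_k_nodes edges root k)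

-- ===== LEMMAS AND PROOFS =====

-- A's in-place sorting pass, seen through getD.
theorem sortpass_getD (ks : List Int) :
    ∀ (d : PySem.Dict Int (List Int)) (u : Int), ks.Nodup →
      (ks.foldl (fun d p => d.insert p (PySem.List.sorted (d.getD p []) (fun x => x) false)) d).getD u []
        = if u ∈ ks then PySem.List.sorted (d.getD u []) (fun x => x) false else d.getD u [] := by
  induction ks with
  | nil => intro d u _; simp
  | cons p ps ih =>
    intro d u hnd
    simp only [List.foldl_cons]
    rw [ih _ _ (List.Nodup.of_cons hnd)]
    by_cases hup : u = p
    · subst hup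
      have hnot : u ∉ ps := (List.nodup_cons.mp hnd).1
      simp [hnot, PySem.Dict.getD_insert_self]
    · rw [PySem.Dict.getD_insert_of_ne _ _ _ hup]
      simp [List.mem_cons, hup]

theorem children_pointwise (edges : List (Int × Int × Int)) (u : Int) :
    (let base := edges.foldl (fun d e => d.modify e.1 [] (· ++ [e.2.1])) PySem.Dict.empty
     base.keys.foldl (fun d p => d.insert p (PySem.List.sorted (d.getD p []) (fun x => x) false)) base).getD u []
    = PySem.List.sorted
        ((edges.foldl (fun d e => d.insert e.1 (d.getD e.1 [] ++ [e.2.1])) PySem.Dict.empty).getD u [])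
        (fun x => x) false := by
  have hbase : edges.foldl (fun d e => d.modify e.1 [] (· ++ [e.2.1])) PySem.Dict.empty
      = edges.foldl (fun d e => d.insert e.1 (d.getD e.1 [] ++ [e.2.1])) PySem.Dict.empty := rfl
  have hnd : (edges.foldl (fun d e => d.insert e.1 (d.getD e.1 [] ++ [e.2.1])) PySem.Dict.empty).keys.Nodup := by
    exact PySem.Dict.nodup_keys_foldl_insert_key edges (·.1)
      (fun d e => d.getD e.1 [] ++ [e.2.1]) PySem.Dict.empty (by simp)
  simp only [hbase]
  rw [sortpass_getD _ _ _ hnd]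
  by_cases hu : u ∈ (edges.foldl (fun d e => d.insert e.1 (d.getD e.1 [] ++ [e.2.1])) PySem.Dict.empty).keys
  · simp [hu]
  · simp only [hu, if_false]
    have : (edges.foldl (fun d e => d.insert e.1 (d.getD e.1 [] ++ [e.2.1])) PySem.Dict.empty).getD u [] = ([] : List Int) := by
      apply PySem.Dict.getD_of_not_contains
      rw [PySem.Dict.contains_eq_decide_mem_keys]
      simpa using hu
    simp [this]
    rfl

-- A's inner child-fold, with the queue split as rest ++ next.
theorem fold_split (cs : List Int) (r : List Int) :
    ∀ (n : List Int) (s : PySem.Set Int),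
      cs.foldl
        (fun (acc : List Int × PySem.Set Int) v =>
          if PySem.Set.contains acc.2 v then acc else (acc.1 ++ [v], PySem.Set.add acc.2 v))
        (r ++ n, s)
      = (r ++ (cs.foldl
          (fun (acc : PySem.Set Int × List Int) v =>
            if PySem.Set.contains acc.1 v then acc else (PySem.Set.add acc.1 v, acc.2 ++ [v]))
          (s, n)).2,
         (cs.foldl
          (fun (acc : PySem.Set Int × List Int) v =>
            if PySem.Set.contains acc.1 v then acc else (PySem.Set.add acc.1 v, acc.2 ++ [v]))
          (s, n)).1) := by
  induction cs with
  | nil => intro n s; simp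
  | cons c cs ih =>
    intro n s
    simp only [List.foldl_cons]
    by_cases h : PySem.Set.contains s c
    · simp only [h, if_true]; exact ih n s
    · simp only [h, List.append_assoc]
      exact ih (n ++ [c]) (PySem.Set.add s c)

-- Bisimulation: A's deque is always (remaining frontier) ++ (next frontier).
theorem bisim (cA cB : PySem.Dict Int (List Int)) (k : Int)
    (h : ∀ u, cA.getD u [] = PySem.List.sorted (cB.getD u []) (fun x => x) false) :
    ∀ (f : List Int) (visited : List Int) (seen : PySem.Set Int) (n : List Int),
      bfsLoopA cA k (f ++ n) visited seen
        = bfsLoopA cA k (bfsInnerB cB k f visited seen n).2.2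
            (bfsInnerB cB k f visited seen n).1 (bfsInnerB cB k f visited seen n).2.1 := by
  intro f
  induction f with
  | nil => intro visited seen n; simp [bfsInnerB]
  | cons u rest ih =>
    intro visited seen n
    by_cases hk : visited.length < k
    · rw [show ((u :: rest) ++ n) = u :: (rest ++ n) from rfl]
      rw [bfsLoopA]
      simp only [hk, if_true]
      rw [h u, fold_split]
      rw [ih (visited ++ [u])]
      simp only [bfsInnerB]
      rw [if_neg (by omega)]
    · simp only [bfsInnerB, if_pos (by omega : k ≤ (visited.length : Int))]
      cases hn : (u :: rest) ++ n with
      | nil => simp at hn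
      | cons a t =>
        rw [bfsLoopA]
        simp only [hk, if_false]
        cases n with
        | nil => simp [bfsLoopA]
        | cons b t' => rw [bfsLoopA]; simp [hk]

theorem outer_eq (cA cB : PySem.Dict Int (List Int)) (k : Int)
    (h : ∀ u, cA.getD u [] = PySem.List.sorted (cB.getD u []) (fun x => x) false) :
    ∀ (f visited : List Int) (seen : PySem.Set Int),
      bfsOuterB cB k f visited seen = bfsLoopA cA k f visited seen := by
  intro f visited seen
  induction f, visited, seen using bfsOuterB.induct cB k with
  | case1 visited seen => simp [bfsOuterB, bfsLoopA]
  | case2 visited seen u rest hk st ih =>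
    rw [bfsOuterB]
    simp only [hk, if_true]
    rw [ih]
    have := bisim cA cB k h (u :: rest) visited seen []
    simpa using this.symm
  | case3 visited seen u rest hk =>
    rw [bfsOuterB, bfsLoopA]
    simp [hk]

-- ===== VERDICT (by name: the statement is the Claim_ definition above) =====
theorem bfs_first_k_nodes_spec : Claim_equal_bfs_first_k_nodes := by
  intro edges root k _
  unfold Spec_bfs_first_k_nodes bfs_first_k_nodes bfs_first_k_nodes_alt
  exact (outer_eq _ _ k (fun u => children_pointwise edges u) [root] [] _).symm
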